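-- pv_equiv track=rewrite | github.com/jmbotero/algorithms | sudoku.py | __gettopmiddlebottom_blockrowindices
-- ===== SOURCE A (Python) =====
-- def __gettopmiddlebottom_blockrowindices(indices):
--     result = None
--
--     blockcolumn_index = [0, 1, 2]
--     indexranges = [[0, 1, 2], [3, 4, 5], [6, 7, 8]]
--
--     for index in indices:
--         for i, irange in enumerate(indexranges):
--             if index in irange:
--                 if i in blockcolumn_index:
--                     blockcolumn_index.remove(i)
--     if len(blockcolumn_index) == 1:
--         result = indexranges[blockcolumn_index[0]]
--
--     return result
-- ===== SOURCE B (Python) =====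
-- def __gettopmiddlebottom_blockrowindices(indices):
--     mask = 0
--     for idx in indices:
--         if 0 <= idx <= 8:
--             mask |= 1 << (idx // 3)
--     if mask == 3:
--         return [6, 7, 8]
--     if mask == 5:
--         return [3, 4, 5]
--     if mask == 6:
--         return [0, 1, 2]
--     return None
-- ===== Notes on version B (the rewrite author's own statement) =====
-- stated objective: simpler
-- what changed: Replaces A's per-index scan of enumerate(indexranges) with removal from a mutable list by a single pass ORing 1 << (idx // 3) into a bitmask of covered blocks, then a literal lookup on the mask (3/5/6 are the exactly-two-blocks-covered masks).
import Mathlib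
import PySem

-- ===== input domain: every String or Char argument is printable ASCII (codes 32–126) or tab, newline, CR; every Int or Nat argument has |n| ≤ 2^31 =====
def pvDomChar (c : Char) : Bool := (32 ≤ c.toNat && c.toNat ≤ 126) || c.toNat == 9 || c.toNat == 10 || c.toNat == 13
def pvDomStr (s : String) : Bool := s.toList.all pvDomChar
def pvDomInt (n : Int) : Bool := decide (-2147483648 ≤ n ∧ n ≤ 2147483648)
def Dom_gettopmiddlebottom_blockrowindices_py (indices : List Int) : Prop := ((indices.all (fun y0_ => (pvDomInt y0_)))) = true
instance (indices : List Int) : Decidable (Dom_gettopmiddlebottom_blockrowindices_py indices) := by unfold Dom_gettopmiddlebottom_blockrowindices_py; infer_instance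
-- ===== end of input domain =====

-- ===== PORT A =====
-- B replaces A's scan-and-remove over the three index ranges by a bitmask of covered blocks (idx // 3) and a literal lookup: simpler, same O(n).
-- A: for each index, scan enumerate(indexranges); remove the block's id from blockcolumn_index on a hit.
def gettopmiddlebottom_blockrowindices_py (indices : List Int) : Option (List Int) :=
  let indexranges : List (List Int) := [[0, 1, 2], [3, 4, 5], [6, 7, 8]]
  let blockcolumn_index : List Int :=
    indices.foldl (fun bc index =>
      (PySem.List.enumerate indexranges).foldl (fun bc p =>
        if index ∈ p.2 then
          (if p.1 ∈ bc then bc.erase p.1 else bc)   -- list.remove(i): erase first occurrence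
        else bc) bc) [0, 1, 2]
  if blockcolumn_index.length == 1 then
    match PySem.List.pyGet? blockcolumn_index 0 with   -- blockcolumn_index[0]
    | some j => PySem.List.pyGet? indexranges j        -- indexranges[...]
    | none => none
  else none

-- ===== PORT B =====
-- B: one pass ORing 1 << (idx // 3) into a mask for in-range indices, then a literal if-chain on the mask.
def gettopmiddlebottom_blockrowindices_py_alt (indices : List Int) : Option (List Int) :=
  let mask : Int :=
    indices.foldl (fun m idx =>
      if 0 ≤ idx ∧ idx ≤ 8 then Int.lor m (Int.shiftLeft 1 (PySem.Int.floordiv idx 3).toNat) else m) 0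
      -- 1 << (idx // 3): exponent is 0, 1 or 2 under the guard, so .toNat is exact
  if mask = 3 then some [6, 7, 8]
  else if mask = 5 then some [3, 4, 5]
  else if mask = 6 then some [0, 1, 2]
  else none

-- ===== PRECONDITION & SPEC =====
def Spec_gettopmiddlebottom_blockrowindices_py (indices : List Int) (out : Option (List Int)) : Prop := out = gettopmiddlebottom_blockrowindices_py_alt indices
instance (indices : List Int) (out : Option (List Int)) : Decidable (Spec_gettopmiddlebottom_blockrowindices_py indices out) := by unfold Spec_gettopmiddlebottom_blockrowindices_py; infer_instance

-- ===== CLAIM (what is proved, stated in full; the proofs are below) =====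
def Claim_equal_gettopmiddlebottom_blockrowindices_py : Prop := ∀ (indices : List Int), Dom_gettopmiddlebottom_blockrowindices_py indices → Spec_gettopmiddlebottom_blockrowindices_py indices (gettopmiddlebottom_blockrowindices_py indices)

-- ===== LEMMAS AND PROOFS =====

-- "index covers block i": index lies in the i-th block row (i = 0, 1, 2)
def pvCov (x i : Int) : Bool := decide (x = 3 * i ∨ x = 3 * i + 1 ∨ x = 3 * i + 2)

-- the mask value encoding which of the three blocks are covered
def pvEnc (a b c : Bool) : Int := (if a then 1 else 0) + (if b then 2 else 0) + (if c then 4 else 0)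

-- one step of A's outer loop turns a filter of [0,1,2] into a finer filter of [0,1,2]
lemma pvStepFilter (p : Int → Bool) (x : Int) :
    (PySem.List.enumerate ([[0, 1, 2], [3, 4, 5], [6, 7, 8]] : List (List Int))).foldl
      (fun bc q => if x ∈ q.2 then (if q.1 ∈ bc then bc.erase q.1 else bc) else bc)
      (([0, 1, 2] : List Int).filter p)
    = ([0, 1, 2] : List Int).filter (fun i => p i && !pvCov x i) := by
  have e : PySem.List.enumerate ([[0, 1, 2], [3, 4, 5], [6, 7, 8]] : List (List Int))
      = [(0, [0, 1, 2]), (1, [3, 4, 5]), (2, [6, 7, 8])] := by decide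
  rw [e]
  have c0 : (x ∈ ([0, 1, 2] : List Int)) ↔ pvCov x 0 = true := by simp [pvCov]
  have c1 : (x ∈ ([3, 4, 5] : List Int)) ↔ pvCov x 1 = true := by simp [pvCov]
  have c2 : (x ∈ ([6, 7, 8] : List Int)) ↔ pvCov x 2 = true := by simp [pvCov]
  cases hp0 : p 0 <;> cases hp1 : p 1 <;> cases hp2 : p 2 <;>
    cases h0 : pvCov x 0 <;> cases h1 : pvCov x 1 <;> cases h2 : pvCov x 2 <;>
    simp [List.filter, hp0, hp1, hp2, h0, h1, h2, c0, c1, c2, List.foldl, List.erase]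

-- A's whole fold as one filter of [0,1,2]
lemma pvFoldFilter (indices : List Int) (p : Int → Bool) :
    indices.foldl (fun bc index =>
      (PySem.List.enumerate ([[0, 1, 2], [3, 4, 5], [6, 7, 8]] : List (List Int))).foldl
        (fun bc q => if index ∈ q.2 then (if q.1 ∈ bc then bc.erase q.1 else bc) else bc) bc)
      (([0, 1, 2] : List Int).filter p)
    = ([0, 1, 2] : List Int).filter (fun i => p i && indices.all (fun x => !pvCov x i)) := by
  induction indices generalizing p with
  | nil => simp
  | cons x xs ih =>
      simp only [List.foldl_cons, pvStepFilter, ih]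
      apply List.filter_congr
      intro i _
      simp [Bool.and_assoc]

-- ORing a single block bit into an encoded mask sets that component
lemma pvLor0 (a b c : Bool) : Int.lor (pvEnc a b c) 1 = pvEnc true b c := by
  cases a <;> cases b <;> cases c <;> decide
lemma pvLor1 (a b c : Bool) : Int.lor (pvEnc a b c) 2 = pvEnc a true c := by
  cases a <;> cases b <;> cases c <;> decide
lemma pvLor2 (a b c : Bool) : Int.lor (pvEnc a b c) 4 = pvEnc a b true := by
  cases a <;> cases b <;> cases c <;> decide

-- B's whole fold computes the encoded cover of the three blocks
lemma pvMaskFold (indices : List Int) (a b c : Bool) :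
    indices.foldl (fun m idx =>
      if 0 ≤ idx ∧ idx ≤ 8 then Int.lor m (Int.shiftLeft 1 (PySem.Int.floordiv idx 3).toNat) else m)
      (pvEnc a b c)
    = pvEnc (a || indices.any (fun x => pvCov x 0))
            (b || indices.any (fun x => pvCov x 1))
            (c || indices.any (fun x => pvCov x 2)) := by
  induction indices generalizing a b c with
  | nil => simp
  | cons x xs ih =>
      simp only [List.foldl_cons, List.any_cons]
      by_cases h : 0 ≤ x ∧ x ≤ 8
      · rw [if_pos h]
        obtain ⟨h0, h8⟩ := h
        interval_cases x <;>
          simp only [show Int.shiftLeft 1 ((PySem.Int.floordiv 0 3).toNat) = 1 from by decide,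
            show Int.shiftLeft 1 ((PySem.Int.floordiv 1 3).toNat) = 1 from by decide,
            show Int.shiftLeft 1 ((PySem.Int.floordiv 2 3).toNat) = 1 from by decide,
            show Int.shiftLeft 1 ((PySem.Int.floordiv 3 3).toNat) = 2 from by decide,
            show Int.shiftLeft 1 ((PySem.Int.floordiv 4 3).toNat) = 2 from by decide,
            show Int.shiftLeft 1 ((PySem.Int.floordiv 5 3).toNat) = 2 from by decide,
            show Int.shiftLeft 1 ((PySem.Int.floordiv 6 3).toNat) = 4 from by decide,
            show Int.shiftLeft 1 ((PySem.Int.floordiv 7 3).toNat) = 4 from by decide,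
            show Int.shiftLeft 1 ((PySem.Int.floordiv 8 3).toNat) = 4 from by decide,
            pvLor0, pvLor1, pvLor2, ih] <;>
          norm_num [pvCov]
      · rw [if_neg h]
        have e0 : pvCov x 0 = false := by simp [pvCov]; omega
        have e1 : pvCov x 1 = false := by simp [pvCov]; omega
        have e2 : pvCov x 2 = false := by simp [pvCov]; omega
        rw [e0, e1, e2, ih]
        simp

-- all (!p) is the negation of any p
lemma pvAllNot (xs : List Int) (p : Int → Bool) : xs.all (fun x => !p x) = !xs.any p := by
  induction xs with
  | nil => rfl
  | cons x xs ih => simp [List.all_cons, List.any_cons, ih]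

-- ===== VERDICT (by name: the statement is the Claim_ definition above) =====
theorem gettopmiddlebottom_blockrowindices_py_spec : Claim_equal_gettopmiddlebottom_blockrowindices_py := by
  intro indices _
  unfold Spec_gettopmiddlebottom_blockrowindices_py
  unfold gettopmiddlebottom_blockrowindices_py gettopmiddlebottom_blockrowindices_py_alt
  have hA := pvFoldFilter indices (fun _ => true)
  rw [show (([0, 1, 2] : List Int).filter (fun _ => true)) = [0, 1, 2] from rfl] at hA
  have hB := pvMaskFold indices false false false
  rw [show pvEnc false false false = 0 from rfl] at hB
  simp only [hA, hB]
  simp only [Bool.true_and, pvAllNot]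
  cases h0 : indices.any (fun x => pvCov x 0) <;>
    cases h1 : indices.any (fun x => pvCov x 1) <;>
    cases h2 : indices.any (fun x => pvCov x 2) <;>
    simp [List.filter, h0, h1, h2, pvEnc, PySem.List.pyGet?, PySem.List.pyIdx?]
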